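-- pv_equiv track=rewrite | github.com/valatwork/modern-python-bootcamp | 999-exercises.py | three_odd_numbers
-- ===== SOURCE A (Python) =====
-- def three_odd_numbers(arr):
--     i = 0
--     while(i < (len(arr) -2)):
--         total = 0
--         j = i
--         while(j <= i+2):
--             total += arr[j]
--             j+=1
--
--         if (j-i) % 3 == 0 and total % 2 != 0:
--             return True
--
--         i+= 1
--     return False
-- ===== SOURCE B (Python) =====
-- def three_odd_numbers(arr):
--     pre = [0]
--     for x in arr:
--         pre.append(pre[-1] + x)
--     for i in range(len(arr) - 2):
--         if (pre[i + 3] - pre[i]) % 2 != 0: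
--             return True
--     return False
-- ===== Notes on version B (the rewrite author's own statement) =====
-- stated objective: alternative
-- what changed: Replaces the fused nested-loop window summation (and its always-true (j-i)%3 check) with a separate prefix-sum table pass plus a single scan testing pre[i+3]-pre[i] for oddness.
import Mathlib
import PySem

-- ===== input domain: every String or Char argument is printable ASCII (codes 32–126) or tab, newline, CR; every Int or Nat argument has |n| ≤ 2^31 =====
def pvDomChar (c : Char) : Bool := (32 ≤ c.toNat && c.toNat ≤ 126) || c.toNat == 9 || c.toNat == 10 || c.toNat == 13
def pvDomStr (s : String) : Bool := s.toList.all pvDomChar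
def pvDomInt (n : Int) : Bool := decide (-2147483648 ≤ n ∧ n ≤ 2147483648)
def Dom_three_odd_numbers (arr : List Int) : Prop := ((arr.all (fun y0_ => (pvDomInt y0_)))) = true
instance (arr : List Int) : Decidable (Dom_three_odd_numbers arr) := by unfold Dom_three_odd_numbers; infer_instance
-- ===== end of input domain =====

-- B replaces A's fused nested-loop window sum (and its always-true (j-i)%3 check) with a
-- prefix-sum table built in a separate pass plus a single scan over window indices (alternative decomposition, same cost).

-- ===== PORT A =====
-- inner while loop: 'while j <= i+2: total += arr[j]; j += 1'
-- (arr[j] is ported as pyGetD arr j 0: on every reachable call 0 ≤ i = initial j and j ≤ i+2 < len arr, so the index is in range and Python never raises)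
def pvInnerA (arr : List Int) (i j total : Int) : Int × Int :=
  if _h : j ≤ i + 2 then pvInnerA arr i (j + 1) (total + PySem.List.pyGetD arr j 0)
  else (total, j)
termination_by (i + 3 - j).toNat
decreasing_by omega

-- outer while loop: 'while i < len(arr) - 2: …'
def pvOuterA (arr : List Int) (i : Int) : Bool :=
  if h : i < PySem.List.len arr - 2 then
    let tj := pvInnerA arr i i 0
    if PySem.Int.mod (tj.2 - i) 3 = 0 ∧ PySem.Int.mod tj.1 2 ≠ 0 then true
    else pvOuterA arr (i + 1)
  else false
termination_by (PySem.List.len arr - 2 - i).toNat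
decreasing_by simp [PySem.List.len] at *; omega

def three_odd_numbers (arr : List Int) : Bool := pvOuterA arr 0

-- ===== PORT B =====
-- 'pre = [0]; for x in arr: pre.append(pre[-1] + x)'
def pvBuildPre (xs : List Int) (pre : List Int) : List Int :=
  match xs with
  | [] => pre
  | x :: rest => pvBuildPre rest (pre ++ [PySem.List.pyGetD pre (-1) 0 + x])

-- 'for i in range(len(arr)-2): if (pre[i+3]-pre[i]) % 2 != 0: return True' ; 'return False'
def pvScanB (pre : List Int) (idxs : List Int) : Bool :=
  match idxs with
  | [] => false
  | i :: rest =>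
    if PySem.Int.mod (PySem.List.pyGetD pre (i + 3) 0 - PySem.List.pyGetD pre i 0) 2 ≠ 0 then true
    else pvScanB pre rest

def three_odd_numbers_alt (arr : List Int) : Bool :=
  pvScanB (pvBuildPre arr [0]) (PySem.List.pyRange 0 (PySem.List.len arr - 2) 1)

-- ===== PRECONDITION & SPEC =====
def Spec_three_odd_numbers (arr : List Int) (out : Bool) : Prop := out = three_odd_numbers_alt arr
instance (arr : List Int) (out : Bool) : Decidable (Spec_three_odd_numbers arr out) := by unfold Spec_three_odd_numbers; infer_instance

-- ===== CLAIM (what is proved, stated in full; the proofs are below) =====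
def Claim_equal_three_odd_numbers : Prop := ∀ (arr : List Int), Dom_three_odd_numbers arr → Spec_three_odd_numbers arr (three_odd_numbers arr)

-- ===== LEMMAS AND PROOFS =====

-- reference prefix-sum chain: scanFrom s xs = running sums of xs starting from s
def pvScanFrom (s : Int) : List Int → List Int
  | [] => []
  | x :: r => (s + x) :: pvScanFrom (s + x) r

theorem pvScanFrom_length (s : Int) (xs : List Int) : (pvScanFrom s xs).length = xs.length := by
  induction xs generalizing s with
  | nil => rfl
  | cons x r ih => simp [pvScanFrom, ih]

theorem pvBuildPre_eq (xs : List Int) : ∀ (pre : List Int) (x : Int),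
    pvBuildPre xs (pre ++ [x]) = pre ++ x :: pvScanFrom x xs := by
  induction xs with
  | nil => intro pre x; simp [pvBuildPre, pvScanFrom]
  | cons y rest ih =>
    intro pre x
    have h1 : PySem.List.pyGetD (pre ++ [x]) (-1) 0 = x :=
      PySem.List.pyGetD_neg_one_append_singleton pre x 0
    calc pvBuildPre (y :: rest) (pre ++ [x])
        = pvBuildPre rest ((pre ++ [x]) ++ [x + y]) := by simp [pvBuildPre, h1]
      _ = (pre ++ [x]) ++ (x + y) :: pvScanFrom (x + y) rest := ih (pre ++ [x]) (x + y)
      _ = pre ++ x :: pvScanFrom x (y :: rest) := by simp [pvScanFrom]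

-- the window identity: pre[k+3] - pre[k] = xs[k] + xs[k+1] + xs[k+2]
theorem pvWindow (k : Nat) : ∀ (s : Int) (xs : List Int), k + 2 < xs.length →
    (s :: pvScanFrom s xs).getD (k + 3) 0 - (s :: pvScanFrom s xs).getD k 0
      = xs.getD k 0 + xs.getD (k + 1) 0 + xs.getD (k + 2) 0 := by
  induction k with
  | zero =>
    intro s xs h
    match xs with
    | a :: b :: c :: r => simp [pvScanFrom]; ring
  | succ k ih =>
    intro s xs h
    match xs with
    | a :: rest =>
      have h' : k + 2 < rest.length := by simp at h; omega
      have := ih (s + a) rest h'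
      simpa [pvScanFrom, List.getD] using this

theorem pvInnerA_eq (arr : List Int) (i : Int) :
    pvInnerA arr i i 0 =
      (0 + PySem.List.pyGetD arr i 0 + PySem.List.pyGetD arr (i + 1) 0 + PySem.List.pyGetD arr (i + 2) 0,
       i + 3) := by
  rw [pvInnerA, dif_pos (by omega : i ≤ i + 2),
      pvInnerA, dif_pos (by omega : i + 1 ≤ i + 2),
      pvInnerA, dif_pos (by omega : i + 1 + 1 ≤ i + 2),
      pvInnerA, dif_neg (by omega : ¬ i + 1 + 1 + 1 ≤ i + 2)]
  have h2 : i + 1 + 1 = i + 2 := by ring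
  rw [h2]
  have h3 : i + 2 + 1 = i + 3 := by ring
  rw [h3]

theorem pvMain (arr : List Int) : ∀ (n : Nat) (i : Int), 0 ≤ i →
    n = (PySem.List.len arr - 2 - i).toNat →
    pvOuterA arr i = pvScanB (0 :: pvScanFrom 0 arr) (PySem.List.pyRange i (PySem.List.len arr - 2) 1) := by
  intro n
  induction n with
  | zero =>
    intro i hi hn
    have hge : PySem.List.len arr - 2 ≤ i := by omega
    rw [pvOuterA, dif_neg (by omega), PySem.List.pyRange_one_eq_nil hge]
    rfl
  | succ n ih =>
    intro i hi hn
    have hlt : i < PySem.List.len arr - 2 := by omega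
    have hL : PySem.List.len arr = (arr.length : Int) := PySem.List.len_eq arr
    have hltN : i < (arr.length : Int) - 2 := by rw [hL] at hlt; exact hlt
    have hlen : i.toNat + 2 < arr.length := by omega
    have hprelenN : (0 :: pvScanFrom 0 arr).length = arr.length + 1 := by
      simp [pvScanFrom_length]
    have hget3 : PySem.List.pyGetD (0 :: pvScanFrom 0 arr) (i + 3) 0
        = (0 :: pvScanFrom 0 arr).getD (i.toNat + 3) 0 := by
      rw [PySem.List.pyGetD_eq_getElem _ 0 (by omega) (by rw [hprelenN]; push_cast; omega),
          List.getD_eq_getElem _ _ (by rw [hprelenN]; omega)]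
      congr 1
      omega
    have hgeti : PySem.List.pyGetD (0 :: pvScanFrom 0 arr) i 0
        = (0 :: pvScanFrom 0 arr).getD i.toNat 0 := by
      rw [PySem.List.pyGetD_eq_getElem _ 0 hi (by rw [hprelenN]; push_cast; omega),
          List.getD_eq_getElem _ _ (by rw [hprelenN]; omega)]
    have hag : ∀ (k : Nat), i.toNat + k < arr.length →
        PySem.List.pyGetD arr (i + (k : Int)) 0 = arr.getD (i.toNat + k) 0 := by
      intro k hk
      rw [PySem.List.pyGetD_eq_getElem _ 0 (by omega) (by omega),
          List.getD_eq_getElem _ _ hk]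
      congr 1
      omega
    have e0 := hag 0 (by omega)
    have e1 := hag 1 (by omega)
    have e2 := hag 2 (by omega)
    norm_num at e0 e1 e2
    have hwin : PySem.List.pyGetD (0 :: pvScanFrom 0 arr) (i + 3) 0 - PySem.List.pyGetD (0 :: pvScanFrom 0 arr) i 0
        = PySem.List.pyGetD arr i 0 + PySem.List.pyGetD arr (i + 1) 0 + PySem.List.pyGetD arr (i + 2) 0 := by
      rw [hget3, hgeti, pvWindow i.toNat 0 arr hlen, e0, e1, e2]
      simp [List.getD_eq_getElem?_getD]
    have hmod3 : PySem.Int.mod (i + 3 - i) 3 = 0 := by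
      have h : i + 3 - i = (3 : Int) := by ring
      rw [h]; decide
    rw [pvOuterA, dif_pos hlt, PySem.List.pyRange_one_cons hlt, pvInnerA_eq]
    simp only [pvScanB, zero_add]
    rw [hwin]
    by_cases hodd : PySem.Int.mod (PySem.List.pyGetD arr i 0 + PySem.List.pyGetD arr (i + 1) 0 + PySem.List.pyGetD arr (i + 2) 0) 2 ≠ 0
    · rw [if_pos ⟨hmod3, hodd⟩, if_pos hodd]
    · rw [if_neg (by intro hc; exact hodd hc.2), if_neg hodd]
      exact ih (i + 1) (by omega) (by omega)

-- ===== VERDICT (by name: the statement is the Claim_ definition above) =====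
theorem three_odd_numbers_spec : Claim_equal_three_odd_numbers := by
  intro arr _
  unfold Spec_three_odd_numbers three_odd_numbers three_odd_numbers_alt
  have hb : pvBuildPre arr [0] = 0 :: pvScanFrom 0 arr := by
    have := pvBuildPre_eq arr [] 0
    simpa using this
  rw [hb, pvMain arr (PySem.List.len arr - 2 - 0).toNat 0 le_rfl rfl]
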